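-- pv_equiv track=rewrite | github.com/rafayk7/c1 | JavaLanguage.py | check_single_comment
-- ===== SOURCE A (Python) =====
-- def check_single_comment(text):
--     in_single_quote = False
--     in_double_quote = False
--     last_char = None
--
--     for char in text:
--         if char == '"':
--             in_double_quote = not in_double_quote
--         elif char == "'":
--             in_single_quote = not in_single_quote
--         elif not in_single_quote and not in_double_quote and last_char and last_char == '/' and char == '/':
--             return True
--
--         last_char = char
--
--     return False
-- ===== SOURCE B (Python) =====
-- def check_single_comment(text):
--     for i in range(len(text) - 1):
--         if text[i] == '/' and text[i + 1] == '/':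
--             prefix = text[:i]
--             if prefix.count('"') % 2 == 0 and prefix.count("'") % 2 == 0:
--                 return True
--     return False
-- ===== Notes on version B (the rewrite author's own statement) =====
-- stated objective: alternative
-- what changed: Replaces A's per-character quote state machine (toggling flags and tracking the previous char) with an index scan that, at each occurrence of the double-slash comment token, checks that the quote counts of the prefix before it are both even.
import Mathlib
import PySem

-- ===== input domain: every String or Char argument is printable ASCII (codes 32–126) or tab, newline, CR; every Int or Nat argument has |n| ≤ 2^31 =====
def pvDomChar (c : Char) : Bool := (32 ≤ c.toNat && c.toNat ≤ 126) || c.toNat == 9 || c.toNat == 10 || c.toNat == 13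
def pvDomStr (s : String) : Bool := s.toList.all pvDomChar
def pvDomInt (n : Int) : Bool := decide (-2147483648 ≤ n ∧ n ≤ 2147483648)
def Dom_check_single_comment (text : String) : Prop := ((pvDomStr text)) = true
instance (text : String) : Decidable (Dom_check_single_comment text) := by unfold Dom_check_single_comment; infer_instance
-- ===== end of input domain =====

-- B replaces A's per-character quote state machine by an index scan that checks each '//'
-- occurrence against the quote parities of the prefix before it (objective: alternative).

-- ===== PORT A =====
-- the for-loop of A with early return, as structural recursion over the characters;
-- state: in_single_quote, in_double_quote, last_char (None → Option Char)
def goA (s d : Bool) (last : Option Char) : List Char → Bool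
  | [] => false
  | c :: cs =>
    if c = '"' then goA s (!d) (some c) cs
    else if c = '\'' then goA (!s) d (some c) cs
    else if s = false ∧ d = false ∧ last = some '/' ∧ c = '/' then true
    else goA s d (some c) cs

def check_single_comment (text : String) : Bool :=
  goA false false none text.toList

-- ===== PORT B =====
-- B's loop body: text[i]=='/' and text[i+1]=='/' and the prefix text[:i] has even quote counts
def bCond (cs : List Char) (i : Nat) : Bool :=
  decide (cs.getD i ' ' = '/') && decide (cs.getD (i + 1) ' ' = '/')
    && decide ((cs.take i).count '"' % 2 = 0) && decide ((cs.take i).count '\'' % 2 = 0)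

def check_single_comment_alt (text : String) : Bool :=
  (List.range (text.toList.length - 1)).any (bCond text.toList)

-- ===== PRECONDITION & SPEC =====
def Spec_check_single_comment (text : String) (out : Bool) : Prop := out = check_single_comment_alt text
instance (text : String) (out : Bool) : Decidable (Spec_check_single_comment text out) := by unfold Spec_check_single_comment; infer_instance

-- ===== CLAIM (what is proved, stated in full; the proofs are below) =====
def Claim_equal_check_single_comment : Prop := ∀ (text : String), Dom_check_single_comment text → Spec_check_single_comment text (check_single_comment text)

-- ===== LEMMAS AND PROOFS =====

-- a quote count is unaffected by dropping a final non-quote character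
lemma count_dropLast (p : List Char) (a : Char) (h : p.getLast? = some '/') (ha : a ≠ '/') :
    p.count a = p.dropLast.count a := by
  have hne : p ≠ [] := by intro e; simp [e] at h
  have hl : p.getLast hne = '/' := by
    rw [List.getLast?_eq_some_getLast hne] at h
    exact Option.some.inj h
  conv_lhs => rw [← List.dropLast_append_getLast hne]
  simp [List.count_append, hl, Ne.symm ha]

lemma parity_succ (n : Nat) : decide ((n + 1) % 2 = 1) = !decide (n % 2 = 1) := by
  rcases Nat.mod_two_eq_zero_or_one n with h | h <;> simp [Nat.add_mod, h]

-- the generalized loop invariant: A with the state determined by consumed prefix p equals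
-- B's scan over the remaining pair positions
lemma goA_eq (rest : List Char) : ∀ (p : List Char),
    goA (decide (p.count '\'' % 2 = 1)) (decide (p.count '"' % 2 = 1)) p.getLast? rest
      = (List.range' (p.length - 1) (p.length + rest.length - 1 - (p.length - 1))).any
          (bCond (p ++ rest)) := by
  induction rest with
  | nil =>
    intro p
    have h0 : p.length + List.length ([] : List Char) - 1 - (p.length - 1) = 0 := by
      simp only [List.length_nil]; omega
    rw [h0]
    simp [goA]
  | cons c rest ih =>
    intro p
    rcases eq_or_ne p [] with hp | hp
    · subst hp
      by_cases hc : c = '"'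
      · subst hc
        simpa [goA, List.count_cons] using ih ['"']
      · by_cases hc' : c = '\''
        · subst hc'
          simpa [goA, List.count_cons] using ih ['\'']
        · simpa [goA, hc, hc', List.count_cons] using ih [c]
    · -- p nonempty
      obtain ⟨l, hl⟩ : ∃ l, p.getLast? = some l := by
        cases hq : p.getLast? with
        | none => exact absurd (List.getLast?_eq_none_iff.mp hq) hp
        | some x => exact ⟨x, rfl⟩
      have hlen : 0 < p.length := List.length_pos_of_ne_nil hp
      have hcount : p.length + (c :: rest).length - 1 - (p.length - 1) = rest.length + 1 := by
        simp only [List.length_cons]; omega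
      have hk1 : p.length - 1 + 1 = p.length := by omega
      have hgetk : (p ++ c :: rest).getD (p.length - 1) ' ' = l := by
        rw [List.getD_append _ _ _ _ (by omega)]
        rw [List.getD_eq_getElem?_getD, ← List.getLast?_eq_getElem?, hl]
        rfl
      have hgetk1 : (p ++ c :: rest).getD (p.length - 1 + 1) ' ' = c := by
        rw [hk1, List.getD_append_right _ _ _ _ (le_refl _)]
        simp
      have htake : (p ++ c :: rest).take (p.length - 1) = p.dropLast := by
        rw [List.take_append_of_le_length (by omega), List.dropLast_eq_take]
      have hbc : bCond (p ++ c :: rest) (p.length - 1)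
          = (decide (l = '/') && decide (c = '/')
            && decide (p.dropLast.count '"' % 2 = 0) && decide (p.dropLast.count '\'' % 2 = 0)) := by
        unfold bCond
        rw [hgetk, hgetk1, htake]
      have hrange : List.range' (p.length - 1) (rest.length + 1)
          = (p.length - 1) :: List.range' p.length rest.length := by
        rw [List.range'_succ, hk1]
      have ihc := ih (p ++ [c])
      have hlen2 : (p ++ [c]).length - 1 = p.length := by simp
      rw [hlen2] at ihc
      have hlen3 : (p ++ [c]).length + rest.length - 1 - p.length = rest.length := by
        simp only [List.length_append, List.length_cons, List.length_nil]; omega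
      rw [hlen3, List.append_assoc] at ihc
      simp only [List.singleton_append, List.getLast?_concat] at ihc
      rw [hcount, hrange, List.any_cons, hbc]
      by_cases hc : c = '"'
      · subst hc
        have hA : goA (decide (p.count '\'' % 2 = 1)) (decide (p.count '"' % 2 = 1)) p.getLast? ('"' :: rest)
            = goA (decide (p.count '\'' % 2 = 1)) (!decide (p.count '"' % 2 = 1)) (some '"') rest := by
          simp [goA]
        have hcnt : (p ++ ['"']).count '"' = p.count '"' + 1 := by simp
        have hcnt' : (p ++ ['"']).count '\'' = p.count '\'' := by simp
        rw [hcnt, hcnt', parity_succ] at ihc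
        rw [hA, ihc]
        simp
      · by_cases hc' : c = '\''
        · subst hc'
          have hA : goA (decide (p.count '\'' % 2 = 1)) (decide (p.count '"' % 2 = 1)) p.getLast? ('\'' :: rest)
              = goA (!decide (p.count '\'' % 2 = 1)) (decide (p.count '"' % 2 = 1)) (some '\'') rest := by
            simp [goA]
          have hcnt : (p ++ ['\'']).count '\'' = p.count '\'' + 1 := by simp
          have hcnt' : (p ++ ['\'']).count '"' = p.count '"' := by simp
          rw [hcnt, hcnt', parity_succ] at ihc
          rw [hA, ihc]
          simp
        · by_cases hcond : (decide (p.count '\'' % 2 = 1)) = false ∧ (decide (p.count '"' % 2 = 1)) = false ∧ p.getLast? = some '/' ∧ c = '/'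
          · obtain ⟨hs, hd, hlp, hcc⟩ := hcond
            have hA : goA (decide (p.count '\'' % 2 = 1)) (decide (p.count '"' % 2 = 1)) p.getLast? (c :: rest) = true := by
              simp only [goA]
              rw [if_neg hc, if_neg hc', if_pos ⟨hs, hd, hlp, hcc⟩]
            have hle : l = '/' := by rw [hl] at hlp; exact Option.some.inj hlp
            have hd2 : p.dropLast.count '"' % 2 = 0 := by
              rw [← count_dropLast p '"' hlp (by decide)]
              simp only [decide_eq_false_iff_not] at hd
              omega
            have hs2 : p.dropLast.count '\'' % 2 = 0 := by
              rw [← count_dropLast p '\'' hlp (by decide)]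
              simp only [decide_eq_false_iff_not] at hs
              omega
            rw [hA]
            simp [hle, hcc, hd2, hs2]
          · have hA : goA (decide (p.count '\'' % 2 = 1)) (decide (p.count '"' % 2 = 1)) p.getLast? (c :: rest)
                = goA (decide (p.count '\'' % 2 = 1)) (decide (p.count '"' % 2 = 1)) (some c) rest := by
              simp only [goA]
              rw [if_neg hc, if_neg hc', if_neg hcond]
            have hbound : (decide (l = '/') && decide (c = '/')
                && decide (p.dropLast.count '"' % 2 = 0) && decide (p.dropLast.count '\'' % 2 = 0)) = false := by
              by_contra hb
              rw [Bool.not_eq_false] at hb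
              simp only [Bool.and_eq_true, decide_eq_true_eq] at hb
              obtain ⟨⟨⟨hbl, hbc2⟩, hbd⟩, hbs⟩ := hb
              have hlp : p.getLast? = some '/' := by rw [hl, hbl]
              apply hcond
              refine ⟨?_, ?_, hlp, hbc2⟩
              · rw [decide_eq_false_iff_not, count_dropLast p '\'' hlp (by decide)]
                omega
              · rw [decide_eq_false_iff_not, count_dropLast p '"' hlp (by decide)]
                omega
            have hcnt : (p ++ [c]).count '"' = p.count '"' := by simp [hc]
            have hcnt' : (p ++ [c]).count '\'' = p.count '\'' := by simp [hc']
            rw [hcnt, hcnt'] at ihc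
            rw [hA, ihc, hbound]
            simp

-- ===== VERDICT (by name: the statement is the Claim_ definition above) =====
theorem check_single_comment_spec : Claim_equal_check_single_comment := by
  intro text _
  unfold Spec_check_single_comment check_single_comment check_single_comment_alt
  have h := goA_eq text.toList []
  simpa [List.range_eq_range'] using h
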